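-- pv_equiv track=rewrite | github.com/chrisglencross/advent-of-code | aoc2019/day24/day24_part1.py | get_biodiversity
-- ===== SOURCE A (Python) =====
-- def get_biodiversity(grid):
--     bit = 1
--     result = 0
--     for y in range(0, 5):
--         for x in range(0, 5):
--             if grid.get((x, y), ".") == "#":
--                 result = result | bit
--             bit *= 2
--     return result
-- ===== SOURCE B (Python) =====
-- def get_biodiversity(grid):
--     # B: iterate the sparse dict entries and compute each bit from its index,
--     # instead of scanning all 25 positions with a doubling bit accumulator.
--     result = 0
--     for (x, y), v in grid.items():
--         if v == '#' and 0 <= x < 5 and 0 <= y < 5: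
--             result += 1 << (x + 5 * y)
--     return result
-- ===== Notes on version B (the rewrite author's own statement) =====
-- stated objective: idiomatic
-- what changed: B loops over the dict's own entries and computes each bit directly as 1 << (x + 5*y), instead of A's dense 5x5 scan that threads a doubling bit accumulator and looks every position up with grid.get.
import Mathlib
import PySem

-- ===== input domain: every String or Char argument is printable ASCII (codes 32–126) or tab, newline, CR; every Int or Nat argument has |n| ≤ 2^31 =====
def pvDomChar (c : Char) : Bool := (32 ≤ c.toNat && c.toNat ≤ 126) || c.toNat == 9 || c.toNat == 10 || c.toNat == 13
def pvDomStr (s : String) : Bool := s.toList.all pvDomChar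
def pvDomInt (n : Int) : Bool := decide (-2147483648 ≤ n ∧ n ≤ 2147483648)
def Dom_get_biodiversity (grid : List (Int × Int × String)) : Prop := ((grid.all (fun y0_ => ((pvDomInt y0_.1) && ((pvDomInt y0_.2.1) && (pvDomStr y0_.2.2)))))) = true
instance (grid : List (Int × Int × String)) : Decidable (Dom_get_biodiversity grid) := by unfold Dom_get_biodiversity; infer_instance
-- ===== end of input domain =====

-- B iterates the grid's own entries, computing each bit directly as 1 << (x + 5*y),
-- instead of A's dense 5x5 scan with grid.get and a doubling bit accumulator (objective: idiomatic).


-- ===== PORT A =====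
-- grid.get((x, y), ".") : first-match association-list lookup with default "."
-- (hand-written because the dict key is the flattened pair (x, y); exact: first match = Python dict lookup on nodup keys)
def pyGetGrid : List (Int × Int × String) → Int → Int → String
  | [], _, _ => "."
  | (a, b, v) :: rest, x, y => if a = x ∧ b = y then v else pyGetGrid rest x y

-- state (bit, result); per x: result |= bit (PySem.Int.bor = Python's |), then bit *= 2
def get_biodiversity (grid : List (Int × Int × String)) : Int :=
  ((PySem.List.pyRange 0 5 1).foldl (fun (st : Int × Int) y =>
    (PySem.List.pyRange 0 5 1).foldl (fun (st : Int × Int) x =>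
      (st.1 * 2, if pyGetGrid grid x y = "#" then PySem.Int.bor st.2 st.1 else st.2)) st)
    (1, 0)).2

-- ===== PORT B =====
-- result += 1 << (x + 5*y) for each '#' entry with 0 <= x < 5 and 0 <= y < 5
-- ('1 << n' is core Lean's '(1 : Int) <<< n', exact for the nonnegative shift the guard ensures)
def get_biodiversity_alt (grid : List (Int × Int × String)) : Int :=
  grid.foldl (fun r e =>
    if e.2.2 = "#" ∧ 0 ≤ e.1 ∧ e.1 < 5 ∧ 0 ≤ e.2.1 ∧ e.2.1 < 5
    then r + (1 : Int) <<< (Int.toNat (e.1 + 5 * e.2.1)) else r) 0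

-- ===== PRECONDITION & SPEC =====
-- Pre_ excludes association lists with a duplicate (x, y) key: a Python dict cannot contain one
-- (the list-to-dict reading of such an input is ambiguous — first match vs last-wins overwrite),
-- so A's value there is an accident of representation, not of the algorithm.
def Pre_get_biodiversity (grid : List (Int × Int × String)) : Prop :=
  (grid.map (fun e => (e.1, e.2.1))).Nodup
instance (grid : List (Int × Int × String)) : Decidable (Pre_get_biodiversity grid) := by unfold Pre_get_biodiversity; infer_instance

def pvWitness_get_biodiversity : (List (Int × Int × String)) := [(0, 0, "#"), (3, 1, "."), (2, 2, "#"), (7, -1, "#")]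

def Spec_get_biodiversity (grid : List (Int × Int × String)) (out : Int) : Prop := out = get_biodiversity_alt grid
instance (grid : List (Int × Int × String)) (out : Int) : Decidable (Spec_get_biodiversity grid out) := by unfold Spec_get_biodiversity; infer_instance

-- ===== CLAIM (what is proved, stated in full; the proofs are below) =====
def Claim_equal_get_biodiversity : Prop := ∀ (grid : List (Int × Int × String)), Dom_get_biodiversity grid → Pre_get_biodiversity grid → Spec_get_biodiversity grid (get_biodiversity grid)

-- ===== LEMMAS AND PROOFS =====

-- the 25 positions in A's visiting order (x fast, y slow); linear index i = x + 5*y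
def allPairs : List (Int × Int) :=
  [(0,0),(1,0),(2,0),(3,0),(4,0),
   (0,1),(1,1),(2,1),(3,1),(4,1),
   (0,2),(1,2),(2,2),(3,2),(4,2),
   (0,3),(1,3),(2,3),(3,3),(4,3),
   (0,4),(1,4),(2,4),(3,4),(4,4)]

-- A's per-position step, abstracted over the lookup function g
def auxStep (g : Int × Int → String) (st : Int × Int) (p : Int × Int) : Int × Int :=
  (st.1 * 2, if g p = "#" then PySem.Int.bor st.2 st.1 else st.2)

-- sum of the bits A would set, with powers starting at k
def sumBits (g : Int × Int → String) : List (Int × Int) → Nat → Int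
  | [], _ => 0
  | p :: L, k => (if g p = "#" then (2:Int)^k else 0) + sumBits g L (k+1)

theorem A_eq_fold (grid : List (Int × Int × String)) :
    get_biodiversity grid =
      (allPairs.foldl (auxStep (fun p => pyGetGrid grid p.1 p.2)) (1, 0)).2 := by
  rfl

theorem or_two_pow (r k : Nat) (h : r < 2^k) : r ||| 2^k = r + 2^k := by
  have := Nat.two_pow_add_eq_or_of_lt h 1
  simp only [Nat.mul_one] at this
  rw [Nat.or_comm]; omega

theorem aux_spec (g : Int × Int → String) :
    ∀ (L : List (Int × Int)) (k r : Nat), r < 2^k →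
      (L.foldl (auxStep g) (((2:Int)^k), (r : Int))).2 = (r : Int) + sumBits g L k := by
  intro L
  induction L with
  | nil => intro k r _; simp [sumBits]
  | cons p L ih =>
    intro k r hr
    have hcast : ((2:Int)^k) = ((2^k : Nat) : Int) := by push_cast; ring
    have hpow : (((2:Int)^k) * 2) = (2:Int)^(k+1) := by ring
    by_cases hp : g p = "#"
    · have hbor : PySem.Int.bor (r : Int) ((2:Int)^k) = ((r + 2^k : Nat) : Int) := by
        rw [hcast, PySem.Int.bor_natCast, or_two_pow r k hr]
      have hlt : r + 2^k < 2^(k+1) := by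
        have : 2^(k+1) = 2^k + 2^k := by ring
        omega
      simp only [List.foldl_cons, auxStep]
      rw [if_pos hp, hbor, hpow, ih (k+1) (r + 2^k) hlt]
      simp only [sumBits]
      rw [if_pos hp]
      push_cast; ring
    · have hlt : r < 2^(k+1) := by
        have : 2^(k+1) = 2^k + 2^k := by ring
        omega
      simp only [List.foldl_cons, auxStep]
      rw [if_neg hp, hpow, ih (k+1) r hlt]
      simp only [sumBits]
      rw [if_neg hp]
      ring

theorem pyGetGrid_not_mem (rest : List (Int × Int × String)) (a b : Int)
    (h : (a, b) ∉ rest.map (fun e => (e.1, e.2.1))) : pyGetGrid rest a b = "." := by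
  induction rest with
  | nil => rfl
  | cons e rest ih =>
    obtain ⟨x, y, v⟩ := e
    simp only [List.map_cons, List.mem_cons, not_or] at h
    have hne : ¬ (x = a ∧ y = b) := by
      rintro ⟨rfl, rfl⟩; exact h.1 rfl
    simp only [pyGetGrid, if_neg hne]
    exact ih h.2

theorem sumBits_congr (g g' : Int × Int → String) :
    ∀ (L : List (Int × Int)) (k : Nat), (∀ p ∈ L, g p = g' p) →
      sumBits g L k = sumBits g' L k := by
  intro L
  induction L with
  | nil => intro k _; rfl
  | cons p L ih =>
    intro k h
    simp only [sumBits, h p (List.mem_cons_self), ih (k+1) (fun q hq => h q (List.mem_cons_of_mem p hq))]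

theorem sumBits_update (g g' : Int × Int → String) (p₀ : Int × Int)
    (h0 : g' p₀ ≠ "#") (hagree : ∀ p, p ≠ p₀ → g p = g' p) :
    ∀ (L : List (Int × Int)) (k : Nat), L.Nodup →
      sumBits g L k = sumBits g' L k +
        (if p₀ ∈ L ∧ g p₀ = "#" then (2:Int)^(k + L.idxOf p₀) else 0) := by
  intro L
  induction L with
  | nil => intro k _; simp [sumBits]
  | cons q L ih =>
    intro k hnd
    by_cases hq : q = p₀
    · subst hq
      have hnotmem : q ∉ L := (List.nodup_cons.mp hnd).1
      have htail : sumBits g L (k+1) = sumBits g' L (k+1) :=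
        sumBits_congr g g' L (k+1) (fun p hp => hagree p (fun he => hnotmem (he ▸ hp)))
      simp only [sumBits, htail, List.idxOf_cons_self, List.mem_cons, true_or, true_and,
        Nat.add_zero, if_neg h0]
      by_cases hgp : g q = "#"
      · simp [hgp]; ring
      · simp [hgp]
    · have hne : q ≠ p₀ := hq
      have hmemiff : (p₀ ∈ q :: L ∧ g p₀ = "#") ↔ (p₀ ∈ L ∧ g p₀ = "#") := by
        constructor
        · rintro ⟨hm, hg⟩
          rcases List.mem_cons.mp hm with h | h
          · exact absurd h.symm hne
          · exact ⟨h, hg⟩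
        · rintro ⟨hm, hg⟩; exact ⟨List.mem_cons_of_mem q hm, hg⟩
      have hidx : (q :: L).idxOf p₀ = L.idxOf p₀ + 1 := List.idxOf_cons_ne L hne
      simp only [sumBits, hagree q hne, ih (k+1) (List.nodup_cons.mp hnd).2]
      by_cases hm : p₀ ∈ L ∧ g p₀ = "#"
      · rw [if_pos hm, if_pos (hmemiff.mpr hm), hidx]
        have : k + 1 + L.idxOf p₀ = k + (L.idxOf p₀ + 1) := by omega
        rw [this]; ring
      · rw [if_neg hm, if_neg (fun h => hm (hmemiff.mp h))]
        ring

theorem allPairs_nodup : allPairs.Nodup := by decide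

theorem mem_allPairs_bounds (p : Int × Int) (hp : p ∈ allPairs) :
    0 ≤ p.1 ∧ p.1 < 5 ∧ 0 ≤ p.2 ∧ p.2 < 5 := by
  obtain ⟨a, b⟩ := p
  fin_cases hp <;> refine ⟨by norm_num, by norm_num, by norm_num, by norm_num⟩

theorem allPairs_mem_idx (a b : Int) (ha0 : 0 ≤ a) (ha : a < 5) (hb0 : 0 ≤ b) (hb : b < 5) :
    (a, b) ∈ allPairs ∧ allPairs.idxOf (a, b) = (a + 5 * b).toNat := by
  interval_cases a <;> interval_cases b <;> exact ⟨by decide, by decide⟩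

-- B's loop body, named so the accumulator can be shifted out
def bStep (r : Int) (e : Int × Int × String) : Int :=
  if e.2.2 = "#" ∧ 0 ≤ e.1 ∧ e.1 < 5 ∧ 0 ≤ e.2.1 ∧ e.2.1 < 5
  then r + (1 : Int) <<< (Int.toNat (e.1 + 5 * e.2.1)) else r

theorem bAlt_eq (grid : List (Int × Int × String)) :
    get_biodiversity_alt grid = grid.foldl bStep 0 := rfl

theorem bStep_shift (r : Int) (e : Int × Int × String) : bStep r e = r + bStep 0 e := by
  unfold bStep; split_ifs <;> ring

theorem foldl_bStep_shift (l : List (Int × Int × String)) :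
    ∀ r : Int, l.foldl bStep r = r + l.foldl bStep 0 := by
  induction l with
  | nil => intro r; simp
  | cons e l ih =>
    intro r
    simp only [List.foldl_cons]
    rw [ih (bStep r e), ih (bStep 0 e), bStep_shift r e]
    ring

-- B peels off the head contribution
theorem B_cons (e : Int × Int × String) (rest : List (Int × Int × String)) :
    get_biodiversity_alt (e :: rest) =
      (if e.2.2 = "#" ∧ 0 ≤ e.1 ∧ e.1 < 5 ∧ 0 ≤ e.2.1 ∧ e.2.1 < 5
        then (1 : Int) <<< (Int.toNat (e.1 + 5 * e.2.1)) else 0) + get_biodiversity_alt rest := by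
  rw [bAlt_eq, List.foldl_cons, foldl_bStep_shift rest (bStep 0 e), ← bAlt_eq]
  unfold bStep
  split_ifs <;> ring

theorem shift_eq_pow (k : Nat) : (1 : Int) <<< k = 2^k := by
  simp [Int.shiftLeft_eq]

theorem main_sum (grid : List (Int × Int × String)) (hpre : Pre_get_biodiversity grid) :
    sumBits (fun p => pyGetGrid grid p.1 p.2) allPairs 0 = get_biodiversity_alt grid := by
  induction grid with
  | nil =>
    simp [sumBits, allPairs, pyGetGrid, get_biodiversity_alt]
  | cons e rest ih =>
    obtain ⟨a, b, v⟩ := e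
    have hnd := hpre
    unfold Pre_get_biodiversity at hnd
    simp only [List.map_cons, List.nodup_cons] at hnd
    have hrest : Pre_get_biodiversity rest := hnd.2
    have hnotkey : (a, b) ∉ rest.map (fun e => (e.1, e.2.1)) := hnd.1
    have hlookdot : pyGetGrid rest a b = "." := pyGetGrid_not_mem rest a b hnotkey
    have hcons : ∀ (p : Int × Int), p ≠ (a, b) →
        pyGetGrid ((a, b, v) :: rest) p.1 p.2 = pyGetGrid rest p.1 p.2 := by
      intro p hp
      have hne : ¬ (a = p.1 ∧ b = p.2) := by
        rintro ⟨h1, h2⟩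
        exact hp (Prod.ext h1.symm h2.symm)
      simp only [pyGetGrid, if_neg hne]
    have hself : pyGetGrid ((a, b, v) :: rest) a b = v := by
      simp [pyGetGrid]
    by_cases hr : 0 ≤ a ∧ a < 5 ∧ 0 ≤ b ∧ b < 5
    · obtain ⟨ha0, ha, hb0, hb⟩ := hr
      obtain ⟨hmem, hidx⟩ := allPairs_mem_idx a b ha0 ha hb0 hb
      have h0 : pyGetGrid rest (a, b).1 (a, b).2 ≠ "#" := by
        simp [hlookdot]
      have hsh : (1 : Int) <<< (Int.toNat (a + 5 * b)) = 2^(Int.toNat (a + 5 * b)) :=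
        shift_eq_pow (Int.toNat (a + 5 * b))
      rw [sumBits_update (fun p => pyGetGrid ((a, b, v) :: rest) p.1 p.2)
            (fun p => pyGetGrid rest p.1 p.2) (a, b) h0 hcons allPairs 0 allPairs_nodup]
      rw [ih hrest, B_cons]
      by_cases hv : v = "#"
      · rw [if_pos ⟨hmem, by simpa [hself] using hv⟩,
            if_pos (show v = "#" ∧ 0 ≤ a ∧ a < 5 ∧ 0 ≤ b ∧ b < 5 from ⟨hv, ha0, ha, hb0, hb⟩)]
        simp only [hidx, Nat.zero_add, hsh]
        ring
      · rw [if_neg (fun h => hv (by simpa [hself] using h.2)),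
            if_neg (fun h => hv h.1)]
        ring
    · have hcongr : ∀ p ∈ allPairs,
          pyGetGrid ((a, b, v) :: rest) p.1 p.2 = pyGetGrid rest p.1 p.2 := by
        intro p hp
        have hbounds := mem_allPairs_bounds p hp
        refine hcons p (fun he => hr ?_)
        rw [he] at hbounds
        exact hbounds
      rw [sumBits_congr _ _ allPairs 0 hcongr, ih hrest, B_cons]
      rw [if_neg (fun h => hr ⟨h.2.1, h.2.2.1, h.2.2.2.1, h.2.2.2.2⟩)]
      ring

-- ===== VERDICT (by name: the statement is the Claim_ definition above) =====
theorem get_biodiversity_spec : Claim_equal_get_biodiversity := by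
  intro grid _ hpre
  unfold Spec_get_biodiversity
  rw [A_eq_fold grid]
  have h01 : (0 : Nat) < 2^0 := by norm_num
  have := aux_spec (fun p => pyGetGrid grid p.1 p.2) allPairs 0 0 h01
  simp only [pow_zero, Nat.cast_zero] at this
  rw [this, zero_add, main_sum grid hpre]
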